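-- pv_equiv track=rewrite | github.com/eclipse-cyclonedds/cyclonedds-python | cyclonedds/tools/cli/layout/barchart.py | format_exponent
-- ===== SOURCE A (Python) =====
-- def format_exponent(num):
--     if num == 0:
--         return "⁰"
--     pre = ""
--     if num < 0:
--         pre = "⁻"
--         num *= -1
--     out = ""
--     while num:
--         c = num % 10
--         num //= 10
--         out += "⁰¹²³⁴⁵⁶⁷⁸⁹"[c]
--     return pre + out[::-1]
-- ===== SOURCE B (Python) =====
-- _SUP = str.maketrans("0123456789", "⁰¹²³⁴⁵⁶⁷⁸⁹")
--
--
-- def format_exponent(num):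
--     body = str(abs(num)).translate(_SUP)
--     return "⁻" + body if num < 0 else body
-- ===== Notes on version B (the rewrite author's own statement) =====
-- stated objective: simpler
-- what changed: Replaces the digit-peeling loop (%10, //10) plus string reversal with a forward character translation of the decimal string of the absolute value via str.translate; the zero case falls out of the translation naturally.
import Mathlib
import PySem

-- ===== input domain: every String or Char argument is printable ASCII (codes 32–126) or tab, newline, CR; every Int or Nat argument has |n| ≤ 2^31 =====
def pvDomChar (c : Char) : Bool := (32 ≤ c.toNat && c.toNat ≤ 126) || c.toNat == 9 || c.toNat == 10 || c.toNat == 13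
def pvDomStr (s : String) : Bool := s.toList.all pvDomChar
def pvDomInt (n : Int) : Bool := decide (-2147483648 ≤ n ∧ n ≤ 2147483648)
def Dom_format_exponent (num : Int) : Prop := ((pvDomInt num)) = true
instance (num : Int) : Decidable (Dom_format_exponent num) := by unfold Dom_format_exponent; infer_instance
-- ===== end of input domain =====

-- B replaces A's %10///10 digit-peeling loop plus reversal with a forward translation of
-- str(abs(num)); objective: simpler (fewer steps, no reversal).

-- ===== PORT A =====
-- the superscript digit table "⁰¹²³⁴⁵⁶⁷⁸⁹" as chars
def pvSupTable : List Char := ['⁰', '¹', '²', '³', '⁴', '⁵', '⁶', '⁷', '⁸', '⁹']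

-- the `while num:` loop; the loop is only ever entered with num > 0 (the ≤ 0 guard is a
-- totality guard); table indexing uses pyGetD since 0 ≤ c ≤ 9 makes IndexError impossible
def pvLoopA (num : Int) (out : List Char) : List Char :=
  if h : num ≤ 0 then out
  else
    let c := PySem.Int.mod num 10
    pvLoopA (PySem.Int.floordiv num 10) (out ++ [PySem.List.pyGetD pvSupTable c ' '])
termination_by num.toNat
decreasing_by
  have h1 : 0 < num := by omega
  have : PySem.Int.floordiv num 10 < num := by
    rw [PySem.Int.floordiv_eq_ediv_of_pos (by omega)]; omega
  have : 0 ≤ PySem.Int.floordiv num 10 := by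
    rw [PySem.Int.floordiv_eq_ediv_of_pos (by omega)]; omega
  omega

def format_exponent (num : Int) : String :=
  if num = 0 then "⁰"
  else
    let pre : List Char := if num < 0 then ['⁻'] else []
    let num' : Int := if num < 0 then num * -1 else num
    -- `pre + out[::-1]` (strings assembled as char lists, joined by String.mk)
    String.mk (pre ++ (pvLoopA num' []).reverse)

-- ===== PORT B =====
-- str.maketrans("0123456789", "⁰¹²³⁴⁵⁶⁷⁸⁹"): chars outside the table map to themselves
def pvSupOf (c : Char) : Char :=
  match c with
  | '0' => '⁰' | '1' => '¹' | '2' => '²' | '3' => '³' | '4' => '⁴'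
  | '5' => '⁵' | '6' => '⁶' | '7' => '⁷' | '8' => '⁸' | '9' => '⁹'
  | c => c

def format_exponent_alt (num : Int) : String :=
  -- body = str(abs(num)).translate(_SUP)
  let body : List Char := (PySem.Int.toChars ((num.natAbs : Int))).map pvSupOf
  String.mk (if num < 0 then '⁻' :: body else body)

-- ===== PRECONDITION & SPEC =====
def Spec_format_exponent (num : Int) (out : String) : Prop := out = format_exponent_alt num
instance (num : Int) (out : String) : Decidable (Spec_format_exponent num out) := by unfold Spec_format_exponent; infer_instance

-- ===== CLAIM (what is proved, stated in full; the proofs are below) =====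
def Claim_equal_format_exponent : Prop := ∀ (num : Int), Dom_format_exponent num → Spec_format_exponent num (format_exponent num)

-- ===== LEMMAS AND PROOFS =====

-- canonical most-significant-first decimal digit characters (what Nat.toDigits 10 produces)
def pvD (n : Nat) : List Char :=
  if h : n / 10 = 0 then [Nat.digitChar (n % 10)]
  else pvD (n / 10) ++ [Nat.digitChar (n % 10)]
termination_by n
decreasing_by exact Nat.div_lt_self (by omega) (by omega)

lemma pv_toDigitsCore (f : Nat) : ∀ n acc, n < f →
    Nat.toDigitsCore 10 f n acc = pvD n ++ acc := by
  induction f with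
  | zero => intro n acc h; omega
  | succ f ih =>
    intro n acc h
    rw [Nat.toDigitsCore, pvD]
    by_cases h10 : n / 10 = 0
    · simp [h10]
    · simp only [h10, if_false, dif_neg h10]
      rw [ih (n / 10) _ (by have := Nat.div_lt_self (by omega : 0 < n) (by omega : 1 < 10); omega)]
      simp

lemma pv_toDigits (n : Nat) : Nat.toDigits 10 n = pvD n := by
  rw [Nat.toDigits, pv_toDigitsCore (n + 1) n [] (by omega)]
  simp

lemma pv_toChars (m : Nat) : PySem.Int.toChars (m : Int) = pvD m := by
  rw [PySem.Int.toChars]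
  simp [pv_toDigits]

-- least-significant-first superscript digits, as A's loop accumulates them
def pvL (n : Nat) : List Char :=
  if h : n = 0 then []
  else pvSupTable.getD (n % 10) ' ' :: pvL (n / 10)
termination_by n
decreasing_by exact Nat.div_lt_self (by omega) (by omega)

lemma pv_loopA (n : Nat) : ∀ out, pvLoopA (n : Int) out = out ++ pvL n := by
  induction n using Nat.strong_induction_on with
  | _ n ih =>
    intro out
    rw [pvLoopA, pvL]
    by_cases h0 : n = 0
    · simp [h0]
    · have hpos : ¬ ((n : Int) ≤ 0) := by omega
      simp only [dif_neg hpos, dif_neg h0]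
      rw [show PySem.Int.floordiv (n : Int) 10 = ((n / 10 : Nat) : Int) from
            PySem.Int.floordiv_natCast n 10,
          show PySem.Int.mod (n : Int) 10 = ((n % 10 : Nat) : Int) from
            PySem.Int.mod_natCast n 10,
          PySem.List.pyGetD_natCast,
          ih (n / 10) (Nat.div_lt_self (by omega) (by omega))]
      simp

lemma pv_sup_digitChar (d : Nat) (h : d < 10) :
    pvSupTable[d]?.getD ' ' = pvSupOf (Nat.digitChar d) := by
  interval_cases d <;> rfl

lemma pv_rev_L (n : Nat) (h : 0 < n) : (pvL n).reverse = (pvD n).map pvSupOf := by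
  induction n using Nat.strong_induction_on with
  | _ n ih =>
    rw [pvL, pvD, dif_neg (by omega : ¬ n = 0)]
    by_cases h10 : n / 10 = 0
    · simp [h10, pvL, pv_sup_digitChar (n % 10) (by omega)]
    · rw [dif_neg h10]
      simp [ih (n / 10) (Nat.div_lt_self (by omega) (by omega)) (by omega),
            pv_sup_digitChar (n % 10) (by omega)]

-- ===== VERDICT (by name: the statement is the Claim_ definition above) =====
theorem format_exponent_spec : Claim_equal_format_exponent := by
  intro num _
  unfold Spec_format_exponent format_exponent format_exponent_alt
  by_cases h0 : num = 0
  · subst h0; decide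
  · rw [if_neg h0]
    have habs : ((num.natAbs : Nat) : Int) = if num < 0 then num * -1 else num := by
      by_cases hn : num < 0 <;> simp [hn] <;> omega
    have hpos : 0 < num.natAbs := by omega
    rw [pv_toChars, ← pv_rev_L _ hpos, ← habs]
    show String.mk ((if num < 0 then ['⁻'] else []) ++ (pvLoopA ((num.natAbs : Nat) : Int) []).reverse)
        = String.mk (if num < 0 then '⁻' :: (pvL num.natAbs).reverse else (pvL num.natAbs).reverse)
    rw [pv_loopA num.natAbs []]
    by_cases hn : num < 0 <;> simp [hn]
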